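-- pv_equiv track=rewrite | github.com/LeeWenxuan1125/DSCI553 | HW3/task1.py | create_bands
-- ===== SOURCE A (Python) =====
-- R = 2
--
-- def create_bands(signature_list, b, r):
--     """
--     ('a': [2,3,4,5,6...]) --> ('a':[2, 3, 4], 'a':[5, 6,7]......)
--     :param signature_list: signature of each business
--     :param b: the number of bands
--     :param r: the size of each band
--     :return:
--     """
--     count = 0
--     band = []
--     bands_res = []
--     for sig in signature_list:
--         count = count + 1
--         band.append(sig)
--         if count == R:
--             bands_res.append(band)
--             count = 0
--             band = []
--
--     return bands_res
-- ===== SOURCE B (Python) =====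
-- R = 2
--
-- def create_bands(signature_list, b, r):
--     m = len(signature_list) // R
--     return [signature_list[i * R:(i + 1) * R] for i in range(m)]
-- ===== Notes on version B (the rewrite author's own statement) =====
-- stated objective: simpler
-- what changed: Replaces the element-by-element loop with counter and flush buffer by a closed-form band count (len // R) and direct slicing of each band.
import Mathlib
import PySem

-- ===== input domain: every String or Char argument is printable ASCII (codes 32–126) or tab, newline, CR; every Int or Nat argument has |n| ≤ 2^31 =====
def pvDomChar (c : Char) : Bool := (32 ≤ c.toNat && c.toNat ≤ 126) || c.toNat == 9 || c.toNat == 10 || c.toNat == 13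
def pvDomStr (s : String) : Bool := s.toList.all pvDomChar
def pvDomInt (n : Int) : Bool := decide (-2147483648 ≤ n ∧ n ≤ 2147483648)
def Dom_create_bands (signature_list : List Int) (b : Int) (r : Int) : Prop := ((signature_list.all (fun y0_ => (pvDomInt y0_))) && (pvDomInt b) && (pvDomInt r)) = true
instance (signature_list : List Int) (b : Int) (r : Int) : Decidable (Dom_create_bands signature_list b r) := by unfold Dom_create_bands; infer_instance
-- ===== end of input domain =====

-- B replaces A's element-by-element loop (counter + flush buffer) with a closed-form
-- band count (len // R) and direct slicing of each band; objective: simpler.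

-- ===== PORT A =====
-- A's loop body: state (count, band, bands_res); flush band when count == R (R = 2).
def pvStepA (s : Int × List Int × List (List Int)) (sig : Int) : Int × List Int × List (List Int) :=
  let count := s.1 + 1
  let band := s.2.1 ++ [sig]
  if count = 2 then (0, [], s.2.2 ++ [band]) else (count, band, s.2.2)

-- A: iterate over the elements with the counter/buffer state, return bands_res.
def create_bands (signature_list : List Int) (b : Int) (r : Int) : List (List Int) :=
  let st := signature_list.foldl pvStepA (0, [], [])
  st.2.2

-- ===== PORT B =====
-- B: m = len // R full bands; band i is the slice [i*R : (i+1)*R].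
def create_bands_alt (signature_list : List Int) (b : Int) (r : Int) : List (List Int) :=
  let m : Int := PySem.Int.floordiv (signature_list.length : Int) 2
  (PySem.List.pyRange 0 m 1).map
    (fun i => PySem.List.slice signature_list (some (i * 2)) (some ((i + 1) * 2)))

-- ===== PRECONDITION & SPEC =====
def Spec_create_bands (signature_list : List Int) (b : Int) (r : Int) (out : List (List Int)) : Prop := out = create_bands_alt signature_list b r
instance (signature_list : List Int) (b : Int) (r : Int) (out : List (List Int)) : Decidable (Spec_create_bands signature_list b r out) := by unfold Spec_create_bands; infer_instance

-- ===== CLAIM (what is proved, stated in full; the proofs are below) =====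
def Claim_equal_create_bands : Prop := ∀ (signature_list : List Int) (b : Int) (r : Int), Dom_create_bands signature_list b r → Spec_create_bands signature_list b r (create_bands signature_list b r)

-- ===== LEMMAS AND PROOFS =====

-- pairwise chunks of size 2, dropping the trailing odd element: the common value
def pvChunks2 : List Int → List (List Int)
  | x :: y :: rest => [x, y] :: pvChunks2 rest
  | _ => []

theorem pvA_fold_eq : ∀ (xs : List Int) (res : List (List Int)),
    (xs.foldl pvStepA (0, [], res)).2.2 = res ++ pvChunks2 xs := by
  intro xs
  induction xs using pvChunks2.induct with
  | case1 x y rest ih =>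
      intro res
      simp [pvChunks2, pvStepA, ih (res ++ [[x, y]])]
  | case2 xs h =>
      match xs, h with
      | [], _ => intro res; simp [pvChunks2]
      | [x], _ => intro res; simp [pvChunks2, pvStepA]
      | x :: y :: rest, h => exact absurd rfl (h x y rest)

theorem pvB_eq_chunks : ∀ (xs : List Int),
    (List.range (xs.length / 2)).map (fun k => (xs.drop (2 * k)).take 2) = pvChunks2 xs := by
  intro xs
  induction xs using pvChunks2.induct with
  | case1 x y rest ih =>
      have hlen : (x :: y :: rest).length / 2 = rest.length / 2 + 1 := by
        simp [List.length_cons]; omega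
      rw [hlen, List.range_succ_eq_map, pvChunks2]
      simp only [List.map_cons, List.map_map]
      refine List.cons_eq_cons.mpr ⟨by simp [List.take], ?_⟩
      rw [← ih]
      apply List.map_congr_left
      intro k _
      simp only [Function.comp_apply]
      have h2 : 2 * Nat.succ k = 2 * k + 1 + 1 := by omega
      rw [h2, List.drop_succ_cons, List.drop_succ_cons]
  | case2 xs h =>
      match xs, h with
      | [], _ => simp [pvChunks2]
      | [x], _ => simp [pvChunks2]
      | x :: y :: rest, h => exact absurd rfl (h x y rest)

-- ===== VERDICT (by name: the statement is the Claim_ definition above) =====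
theorem create_bands_spec : Claim_equal_create_bands := by
  intro xs b r _
  show create_bands xs b r = create_bands_alt xs b r
  have hA : create_bands xs b r = pvChunks2 xs := by
    show (xs.foldl pvStepA (0, [], [])).2.2 = pvChunks2 xs
    simpa using pvA_fold_eq xs []
  have hm : PySem.Int.floordiv (xs.length : Int) 2 = ((xs.length / 2 : Nat) : Int) := by
    exact_mod_cast PySem.Int.floordiv_natCast xs.length 2
  have hB : create_bands_alt xs b r
      = (List.range (xs.length / 2)).map (fun k => (xs.drop (2 * k)).take 2) := by
    show (PySem.List.pyRange 0 (PySem.Int.floordiv (xs.length : Int) 2) 1).map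
        (fun i => PySem.List.slice xs (some (i * 2)) (some ((i + 1) * 2)))
      = (List.range (xs.length / 2)).map (fun k => (xs.drop (2 * k)).take 2)
    rw [hm, PySem.List.pyRange_zero_natCast, List.map_map]
    apply List.map_congr_left
    intro k _
    simp only [Function.comp_apply]
    have hs : PySem.List.slice xs (some ((k : Int) * 2)) (some (((k : Int) + 1) * 2))
        = (xs.drop (2 * k)).take 2 := by
      have h1 : ((k : Int) * 2) = ((2 * k : Nat) : Int) := by push_cast; ring
      have h2 : (((k : Int) + 1) * 2) = ((2 * k : Nat) : Int) + ((2 : Nat) : Int) := by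
        push_cast; ring
      rw [h1, h2, PySem.List.slice_natCast_add]
    exact hs
  rw [hA, hB, pvB_eq_chunks]
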